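-- pv_equiv track=rewrite | github.com/Mewzok/python-exercises | day39_exercise.py | cleaned_activity_summary
-- ===== SOURCE A (Python) =====
-- def cleaned_activity_summary(actions):
--     counts = {}
--     filtered_users = {"", "admin"}
--     filtered_actions = {"logout"}
--
--     for user, action in actions:
--         if user not in filtered_users and action not in filtered_actions:
--             counts[user] = counts.get(user, 0) + 1
--
--     return counts
-- ===== SOURCE B (Python) =====
-- def cleaned_activity_summary(actions):
--     kept = [user for user, action in actions
--             if user not in {"", "admin"} and action not in {"logout"}]
--     counts = {}
--     remaining = kept
--     while remaining:
--         head = remaining[0]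
--         counts[head] = sum(1 for u in remaining if u == head)
--         remaining = [u for u in remaining if u != head]
--     return counts
-- ===== Notes on version B (the rewrite author's own statement) =====
-- stated objective: alternative
-- what changed: Replaces the single guarded dict-tally pass with a successive-extraction scheme: after filtering out excluded users/actions, it repeatedly takes the first remaining user, counts and records all of that user's occurrences, and strips them from the worklist, so no running tally or per-key lookup is kept at all.
import Mathlib
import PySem

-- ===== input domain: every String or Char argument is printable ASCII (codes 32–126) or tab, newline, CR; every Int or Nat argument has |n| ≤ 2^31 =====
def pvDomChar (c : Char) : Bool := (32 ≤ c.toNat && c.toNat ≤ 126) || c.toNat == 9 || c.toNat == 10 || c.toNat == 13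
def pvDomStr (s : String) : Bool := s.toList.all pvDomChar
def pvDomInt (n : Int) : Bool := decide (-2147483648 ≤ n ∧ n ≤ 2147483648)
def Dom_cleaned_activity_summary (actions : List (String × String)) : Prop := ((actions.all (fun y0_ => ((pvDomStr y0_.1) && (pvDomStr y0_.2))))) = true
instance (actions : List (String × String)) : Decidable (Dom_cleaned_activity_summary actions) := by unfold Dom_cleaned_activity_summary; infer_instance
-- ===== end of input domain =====

-- B replaces A's single guarded dict-tally pass with successive extraction: filter the
-- surviving users, then repeatedly count-and-strip the first remaining user (alternative).

-- ===== PORT A =====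
-- one pass: counts[user] = counts.get(user, 0) + 1 for each surviving (user, action)
def cleaned_activity_summary (actions : List (String × String)) : List (String × Int) :=
  (actions.foldl
    (fun counts p =>
      if !(p.1 == "" || p.1 == "admin") && !(p.2 == "logout")
      then counts.insert p.1 (counts.getD p.1 0 + 1)
      else counts)
    PySem.Dict.empty).items

-- ===== PORT B =====
-- the while loop: take the first remaining user, record its multiplicity, strip it, repeat
def pvGoStrip : List String → List (String × Int)
  | [] => []
  | u :: rest =>
    (u, ((u :: rest).count u : Int)) :: pvGoStrip ((u :: rest).filter (fun v => !(v == u)))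
termination_by l => l.length
decreasing_by
  simp only [List.filter_cons, beq_self_eq_true, Bool.not_true, List.length_cons]
  exact Nat.lt_succ_of_le (List.length_filter_le _ _)

-- kept = surviving users; then the successive-extraction loop builds the dict
def cleaned_activity_summary_alt (actions : List (String × String)) : List (String × Int) :=
  let kept := (actions.filter (fun p => !(p.1 == "" || p.1 == "admin") && !(p.2 == "logout"))).map (fun p => p.1)
  pvGoStrip kept

-- ===== PRECONDITION & SPEC =====
def Spec_cleaned_activity_summary (actions : List (String × String)) (out : List (String × Int)) : Prop := out = cleaned_activity_summary_alt actions
instance (actions : List (String × String)) (out : List (String × Int)) : Decidable (Spec_cleaned_activity_summary actions out) := by unfold Spec_cleaned_activity_summary; infer_instance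

-- ===== CLAIM (what is proved, stated in full; the proofs are below) =====
def Claim_equal_cleaned_activity_summary : Prop := ∀ (actions : List (String × String)), Dom_cleaned_activity_summary actions → Spec_cleaned_activity_summary actions (cleaned_activity_summary actions)

-- ===== LEMMAS AND PROOFS =====

-- A's guarded fold over the pairs is the Counter fold over the surviving users.
theorem pv_fold_eq_counter_fold (actions : List (String × String)) (d : PySem.Dict String Int) :
    actions.foldl
      (fun counts p =>
        if !(p.1 == "" || p.1 == "admin") && !(p.2 == "logout")
        then counts.insert p.1 (counts.getD p.1 0 + 1)
        else counts) d
    = ((actions.filter (fun p => !(p.1 == "" || p.1 == "admin") && !(p.2 == "logout"))).map (fun p => p.1)).foldl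
        (fun counts u => counts.modify u 0 (· + 1)) d := by
  induction actions generalizing d with
  | nil => rfl
  | cons p rest ih =>
    rw [List.foldl_cons, List.filter_cons]
    by_cases h : (!(p.1 == "" || p.1 == "admin") && !(p.2 == "logout")) = true
    · simp only [if_pos h, List.map_cons, List.foldl_cons]
      rw [show PySem.Dict.modify d p.1 0 (· + 1) = d.insert p.1 (d.getD p.1 0 + 1) from rfl]
      exact ih _
    · simp only [if_neg h]
      exact ih d

-- adding elements distinct from the head keeps the head in front
theorem pv_foldl_add_cons {α : Type} [BEq α] [LawfulBEq α] (u : α) (l : List α) (s : List α)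
    (h : ∀ v ∈ l, (v == u) = false) :
    l.foldl PySem.Set.add (u :: s) = u :: l.foldl PySem.Set.add s := by
  induction l generalizing s with
  | nil => rfl
  | cons v rest ih =>
    have hv : (v == u) = false := h v (List.mem_cons_self)
    have hrest : ∀ w ∈ rest, (w == u) = false := fun w hw => h w (List.mem_cons_of_mem _ hw)
    simp only [List.foldl_cons]
    have : PySem.Set.add (u :: s) v = u :: PySem.Set.add s v := by
      simp [PySem.Set.add, PySem.Set.contains, hv]
      split_ifs <;> simp_all
    rw [this, ih _ hrest]

-- elements already in the accumulator may be filtered away before folding Set.add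
theorem pv_foldl_add_filter {α : Type} [BEq α] [LawfulBEq α] (u : α) (l : List α) (s : List α)
    (h : u ∈ s) :
    l.foldl PySem.Set.add s = (l.filter (fun v => !(v == u))).foldl PySem.Set.add s := by
  induction l generalizing s with
  | nil => rfl
  | cons v rest ih =>
    rw [List.foldl_cons, List.filter_cons]
    by_cases hv : (v == u) = true
    · have hvu : v = u := eq_of_beq hv
      have hadd : PySem.Set.add s v = s := by
        simp [PySem.Set.add, PySem.Set.contains, hvu]
        exact h
      simp only [hv, Bool.not_true]
      rw [if_neg (by simp), hadd]
      exact ih s h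
    · have hv' : (!(v == u)) = true := by simp [Bool.eq_false_iff.mpr hv]
      rw [if_pos hv', List.foldl_cons]
      apply ih
      have : s ⊆ PySem.Set.add s v := by
        intro w hw
        exact (PySem.Set.mem_add s v w).mpr (Or.inl hw)
      exact this h

-- first-occurrence dedup of a cons: head, then the dedup of the tail with the head stripped
theorem pv_ofList_cons_strip {α : Type} [BEq α] [LawfulBEq α] (u : α) (l : List α) :
    PySem.Set.ofList (u :: l) = u :: PySem.Set.ofList (l.filter (fun v => !(v == u))) := by
  have h1 : PySem.Set.ofList (u :: l) = l.foldl PySem.Set.add [u] := by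
    rw [PySem.Set.ofList_eq_foldl]
    rfl
  rw [h1, pv_foldl_add_filter u l [u] (List.mem_singleton.mpr rfl)]
  rw [pv_foldl_add_cons u _ []]
  · rw [PySem.Set.ofList_eq_foldl]
  · intro v hv
    have := List.of_mem_filter hv
    simpa using this

-- the successive-extraction loop computes exactly Counter(kept).items()
theorem pvGoStrip_eq (l : List String) :
    pvGoStrip l = (PySem.Set.ofList l).map (fun u => (u, (l.count u : Int))) := by
  induction l using pvGoStrip.induct with
  | case1 => simp [pvGoStrip]
  | case2 u rest ih =>
    have hf : (u :: rest).filter (fun v => !(v == u)) = rest.filter (fun v => !(v == u)) := by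
      simp
    rw [pvGoStrip, pv_ofList_cons_strip, List.map_cons]
    rw [hf] at ih ⊢
    rw [ih]
    congr 1
    apply List.map_congr_left
    intro v hv
    have hv' : v ∈ rest.filter (fun v => !(v == u)) :=
      (PySem.Set.mem_ofList _ _).mp hv
    have hne : (v == u) = false := by
      have := List.of_mem_filter hv'
      simpa using this
    have hb : (!(v == u)) = true := by rw [hne]; rfl
    have h2 : (u == v) = false := by
      cases hq : (u == v) with
      | false => rfl
      | true =>
        have := eq_of_beq hq
        subst this
        simp at hne
    have hcount : (rest.filter (fun w => !(w == u))).count v = (u :: rest).count v := by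
      simp [List.count_filter, hb, List.count_cons, h2]
    rw [hcount]

-- ===== VERDICT (by name: the statement is the Claim_ definition above) =====
theorem cleaned_activity_summary_spec : Claim_equal_cleaned_activity_summary := by
  intro actions _
  unfold Spec_cleaned_activity_summary cleaned_activity_summary cleaned_activity_summary_alt
  rw [pv_fold_eq_counter_fold]
  rw [show (((actions.filter (fun p => !(p.1 == "" || p.1 == "admin") && !(p.2 == "logout"))).map (fun p => p.1)).foldl
        (fun counts u => PySem.Dict.modify counts u 0 (· + 1)) PySem.Dict.empty)
      = PySem.Dict.counter ((actions.filter (fun p => !(p.1 == "" || p.1 == "admin") && !(p.2 == "logout"))).map (fun p => p.1)) from rfl]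
  rw [PySem.Dict.items_counter, pvGoStrip_eq]
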